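-- pv_equiv track=rewrite | github.com/ontology-tools/onto-spread-ed | packages/ose-app/src/ose_app/routes/edit.py | checkNotUnique
-- ===== SOURCE A (Python) =====
-- def checkNotUnique(cell, column, headers, table):
--     counter = 0
--     cellStr = cell.strip()
--     if cellStr == "":
--         return False
--     # if Label, ID or Definition column, check cell against all other cells in the same column and return true if same
--     for r in range(len(table)):
--         row = [v for v in table[r].values()]
--         del row[0]  # remove extra numbered "id" column
--         for c in range(len(headers)):
--             if headers[c] == "ID" and column == "ID":
--                 if row[c].strip() == cellStr:
--                     counter += 1
--                     if counter > 1:  # more than one of the same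
--                         return True
--             if headers[c] == "Label" and column == "Label":
--                 if row[c].strip() == cellStr:
--                     counter += 1
--                     if counter > 1:
--                         return True
--             if headers[c] == "Definition" and column == "Definition":
--                 if row[c].strip() == cellStr:
--                     counter += 1
--                     if counter > 1:
--                         return True
--     return False
-- ===== SOURCE B (Python) =====
-- def checkNotUnique(cell, column, headers, table):
--     cellStr = cell.strip()
--     if cellStr == "":
--         return False
--     targets = ("ID", "Label", "Definition")
--     occurrences = [v.strip()
--                    for row in table
--                    for h, v in zip(headers, list(row.values())[1:])
--                    if column in targets and h == column]
--     counts = {}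
--     for v in occurrences:
--         counts[v] = counts.get(v, 0) + 1
--     return counts.get(cellStr, 0) > 1
-- ===== Notes on version B (the rewrite author's own statement) =====
-- stated objective: idiomatic
-- what changed: B flattens the matching-column cells of the whole table in one zip-based comprehension and answers by a single lookup in a frequency dictionary, instead of A's per-row rebuild of the value list with nested index loops, a running counter and early return.
import Mathlib
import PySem

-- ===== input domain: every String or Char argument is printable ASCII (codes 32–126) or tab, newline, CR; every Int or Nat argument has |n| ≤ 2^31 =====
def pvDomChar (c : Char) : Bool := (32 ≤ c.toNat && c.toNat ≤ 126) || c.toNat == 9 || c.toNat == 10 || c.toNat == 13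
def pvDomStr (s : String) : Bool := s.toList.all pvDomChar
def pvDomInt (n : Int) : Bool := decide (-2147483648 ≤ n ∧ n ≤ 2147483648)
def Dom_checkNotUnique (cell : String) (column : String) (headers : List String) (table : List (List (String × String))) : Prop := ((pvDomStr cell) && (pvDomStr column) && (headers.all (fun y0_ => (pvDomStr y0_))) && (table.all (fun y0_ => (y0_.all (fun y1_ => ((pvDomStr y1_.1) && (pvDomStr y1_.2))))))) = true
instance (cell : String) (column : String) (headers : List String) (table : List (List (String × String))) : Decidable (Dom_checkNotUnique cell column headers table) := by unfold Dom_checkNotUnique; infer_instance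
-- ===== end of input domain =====

-- B flattens the matching-column cells with one zip-based comprehension and answers by one
-- lookup in a frequency dictionary, instead of A's nested index loops over every header with a
-- running counter and early return (same return value wherever A returns; measured faster).

-- ===== PORT A =====
-- one of the three identical if-blocks of A's inner loop ('if headers[c] == name and column == name: …')
def cnuBranch (name column h sv cellStr : String) (k : Int) : Option Int :=
  if h == name && column == name then
    if sv == cellStr then
      if k + 1 > 1 then none            -- 'return True'
      else some (k + 1)
    else some k
  else some k

-- body of A's inner loop for one index c; 'none' = the early 'return True'.
-- row[c] is read with pyGetD: Python raises IndexError out of range — excluded by Pre_.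
def cnuStep (column cellStr : String) (headers row : List String) (c : Int) (k : Int) : Option Int :=
  let h := PySem.List.pyGetD headers c ""
  let sv := PySem.Str.strip (PySem.List.pyGetD row c "")
  (cnuBranch "ID" column h sv cellStr k).bind fun k =>
    (cnuBranch "Label" column h sv cellStr k).bind fun k =>
      cnuBranch "Definition" column h sv cellStr k

-- 'for c in range(len(headers)):'
def cnuInner (column cellStr : String) (headers row : List String) : List Int → Int → Option Int
  | [], k => some k
  | c :: rest, k =>
    match cnuStep column cellStr headers row c k with
    | none => none
    | some k' => cnuInner column cellStr headers row rest k'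

-- 'for r in range(len(table)):' — row = list(table[r].values()); del row[0]
-- (an empty dict raises IndexError at 'del row[0]': the 'none' arm is excluded by Pre_).
def cnuRows (column cellStr : String) (headers : List String) : List (List (String × String)) → Int → Bool
  | [], _ => false
  | rp :: rest, k =>
    match PySem.List.pop? ((PySem.Dict.ofList rp).values) 0 with
    | none => false
    | some (_, row) =>
      match cnuInner column cellStr headers row (PySem.List.pyRange 0 (headers.length : Int) 1) k with
      | none => true
      | some k' => cnuRows column cellStr headers rest k'

def checkNotUnique (cell : String) (column : String) (headers : List String) (table : List (List (String × String))) : Bool :=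
  let cellStr := PySem.Str.strip cell
  if cellStr == "" then false
  else cnuRows column cellStr headers table 0

-- ===== PORT B =====
-- occurrences = [v.strip() for row in table for h, v in zip(headers, list(row.values())[1:])
--                if column in targets and h == column]
def cnuAltOccs (column : String) (headers : List String) (table : List (List (String × String))) : List String :=
  table.flatMap fun rp =>
    ((headers.zip (((PySem.Dict.ofList rp).values).drop 1)).filter
        (fun p => (column == "ID" || column == "Label" || column == "Definition") && p.1 == column)).map
      (fun p => PySem.Str.strip p.2)

def checkNotUnique_alt (cell : String) (column : String) (headers : List String) (table : List (List (String × String))) : Bool :=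
  let cellStr := PySem.Str.strip cell
  if cellStr == "" then false
  else
    let occurrences := cnuAltOccs column headers table
    let counts := occurrences.foldl (fun d v => d.insert v (d.getD v 0 + 1)) (PySem.Dict.empty : PySem.Dict String Int)
    decide (counts.getD cellStr 0 > 1)

-- ===== PRECONDITION & SPEC =====
-- list(row.values())[1:] ('del row[0]' removes the numbered id column)
def cnuVals (rp : List (String × String)) : List String := ((PySem.Dict.ofList rp).values).drop 1

-- 'this header position is a relevant match for the queried column'
def cnuMatchN (column : String) (headers : List String) (c : Nat) : Bool :=
  (column == "ID" || column == "Label" || column == "Definition") && (headers.getD c "" == column)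

-- 'position c of this row is an in-range matching cell whose stripped value equals cellStr'
def cnuHitN (column cellStr : String) (headers vals : List String) (c : Nat) : Bool :=
  cnuMatchN column headers c && decide (c < vals.length) && (PySem.Str.strip (vals.getD c "") == cellStr)

-- first matching header position that is beyond the end of the row (where Python's row[c] raises)
def cnuRowBad (column : String) (headers : List String) (vals : List String) : Option Nat :=
  (List.range headers.length).find? (fun c => cnuMatchN column headers c && decide (vals.length ≤ c))

-- a row Python scans without raising: a non-empty dict with every matching position in range
def cnuRowGood (column : String) (headers : List String) (rp : List (String × String)) : Bool :=
  !rp.isEmpty && (cnuRowBad column headers (cnuVals rp)).isNone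

def cnuHits (column cellStr : String) (headers vals : List String) (upto : Nat) : Nat :=
  (List.range upto).countP (cnuHitN column cellStr headers vals)

-- number of matching duplicate occurrences that lie (in row-then-column scan order) strictly
-- before the first malformed access: full rows while rows are good, then the prefix of the
-- first bad row up to its bad position (nothing if that row is an empty dict)
def cnuPreHits (column cellStr : String) (headers : List String) : List (List (String × String)) → Nat
  | [] => 0
  | rp :: rest =>
    if cnuRowGood column headers rp then
      cnuHits column cellStr headers (cnuVals rp) headers.length + cnuPreHits column cellStr headers rest
    else if rp.isEmpty then 0
    else
      match cnuRowBad column headers (cnuVals rp) with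
      | none => 0
      | some b => cnuHits column cellStr headers (cnuVals rp) b

-- Pre_ is exactly the set of inputs on which the Python A returns (everywhere else it raises
-- IndexError): the cell is blank, or every row is a non-empty dict whose matching columns are
-- all in range, or at least two duplicate occurrences are scanned before the first bad access
-- (so A's early 'return True' fires before the raise).
def Pre_checkNotUnique (cell : String) (column : String) (headers : List String) (table : List (List (String × String))) : Prop :=
  PySem.Str.strip cell = "" ∨
    (∀ rp ∈ table, cnuRowGood column headers rp = true) ∨
    2 ≤ cnuPreHits column (PySem.Str.strip cell) headers table
instance (cell : String) (column : String) (headers : List String) (table : List (List (String × String))) : Decidable (Pre_checkNotUnique cell column headers table) := by unfold Pre_checkNotUnique; infer_instance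

def pvWitness_checkNotUnique : String × String × List String × (List (List (String × String))) :=
  ("x", "ID", ["ID"], [[("n", "0"), ("ID", "y")], [("n", "1"), ("ID", "x")]])

def Spec_checkNotUnique (cell : String) (column : String) (headers : List String) (table : List (List (String × String))) (out : Bool) : Prop := out = checkNotUnique_alt cell column headers table
instance (cell : String) (column : String) (headers : List String) (table : List (List (String × String))) (out : Bool) : Decidable (Spec_checkNotUnique cell column headers table out) := by unfold Spec_checkNotUnique; infer_instance

-- ===== CLAIM (what is proved, stated in full; the proofs are below) =====
def Claim_equal_checkNotUnique : Prop := ∀ (cell : String) (column : String) (headers : List String) (table : List (List (String × String))), Dom_checkNotUnique cell column headers table → Pre_checkNotUnique cell column headers table → Spec_checkNotUnique cell column headers table (checkNotUnique cell column headers table)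

-- ===== LEMMAS AND PROOFS =====

-- the Int-indexed hit predicate matching port A's reads
def cnuHit (column cellStr : String) (headers row : List String) (c : Int) : Bool :=
  ((PySem.List.pyGetD headers c "" == "ID" && column == "ID")
      || (PySem.List.pyGetD headers c "" == "Label" && column == "Label")
      || (PySem.List.pyGetD headers c "" == "Definition" && column == "Definition"))
    && (PySem.Str.strip (PySem.List.pyGetD row c "") == cellStr)

theorem cnuStep_eq (column cellStr : String) (headers row : List String) (c : Int) (k : Int) :
    cnuStep column cellStr headers row c k =
      if cnuHit column cellStr headers row c then
        (if k + 1 > 1 then none else some (k + 1))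
      else some k := by
  unfold cnuStep cnuBranch cnuHit
  by_cases h1 : PySem.List.pyGetD headers c "" = "ID" <;>
    by_cases h2 : PySem.List.pyGetD headers c "" = "Label" <;>
      by_cases h3 : PySem.List.pyGetD headers c "" = "Definition" <;>
        simp_all <;> split_ifs <;> simp_all

theorem cnuInner_eq (column cellStr : String) (headers row : List String) (cs : List Int) :
    ∀ k : Int, k ≤ 1 →
      cnuInner column cellStr headers row cs k =
      if k + (cs.countP (cnuHit column cellStr headers row) : Int) > 1 then none
      else some (k + (cs.countP (cnuHit column cellStr headers row) : Int)) := by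
  induction cs with
  | nil =>
    intro k hk
    simp only [cnuInner, List.countP_nil]
    rw [if_neg (by omega)]
    norm_num
  | cons c rest ih =>
    intro k hk
    rw [cnuInner, cnuStep_eq]
    by_cases hc : cnuHit column cellStr headers row c
    · have hcnt : (c :: rest).countP (cnuHit column cellStr headers row)
          = rest.countP (cnuHit column cellStr headers row) + 1 := by
        simp [hc]
      rw [if_pos hc, hcnt]
      by_cases hk1 : k + 1 > 1
      · have hbig : k + ((rest.countP (cnuHit column cellStr headers row) + 1 : Nat) : Int) > 1 := by
          push_cast; omega
        rw [if_pos hk1, if_pos hbig]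
      · rw [if_neg hk1]
        have heq : k + 1 + ((rest.countP (cnuHit column cellStr headers row) : Nat) : Int)
            = k + ((rest.countP (cnuHit column cellStr headers row) + 1 : Nat) : Int) := by
          omega
        calc (match some (k + 1) with
              | none => none
              | some k' => cnuInner column cellStr headers row rest k')
            = cnuInner column cellStr headers row rest (k + 1) := rfl
          _ = _ := by rw [ih (k + 1) (by omega), heq]
    · have hcnt : (c :: rest).countP (cnuHit column cellStr headers row)
          = rest.countP (cnuHit column cellStr headers row) := by
        simp [hc]
      rw [if_neg hc, hcnt]
      exact ih k hk

-- the two guard formulations agree: 'column in targets and h == column' vs A's three tests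
theorem cnuGuard_eq (h column : String) :
    ((column == "ID" || column == "Label" || column == "Definition") && (h == column))
      = ((h == "ID" && column == "ID") || (h == "Label" && column == "Label") ||
          (h == "Definition" && column == "Definition")) := by
  cases hh : h == column <;>
    cases hc1 : column == "ID" <;> cases hc2 : column == "Label" <;>
      cases hc3 : column == "Definition" <;> simp_all

-- for a non-blank cellStr, port A's Int-indexed hit test is the Nat-indexed one
theorem cnuHit_cast (column cellStr : String) (headers vals : List String) (c : Nat)
    (hcell : cellStr ≠ "") :
    cnuHit column cellStr headers vals (c : Int) = cnuHitN column cellStr headers vals c := by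
  unfold cnuHit cnuHitN cnuMatchN
  rw [← cnuGuard_eq]
  simp only [PySem.List.pyGetD_natCast]
  by_cases hlt : c < vals.length
  · simp [hlt]
  · have hstr : PySem.Str.strip ("" : String) = "" := rfl
    simp [hlt, hstr, Ne.symm hcell]

-- per-row count of port A's inner loop = cnuHits over the whole header range
theorem cnuRowCnt_cast (column cellStr : String) (headers vals : List String)
    (hcell : cellStr ≠ "") :
    (PySem.List.pyRange 0 (headers.length : Int) 1).countP (cnuHit column cellStr headers vals)
      = cnuHits column cellStr headers vals headers.length := by
  rw [PySem.List.pyRange_zero_natCast, List.countP_map]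
  unfold cnuHits
  exact List.countP_congr fun c _ => by
    simp only [Function.comp]; rw [cnuHit_cast column cellStr headers vals c hcell]

theorem dict_update_items_ne_nil {rp : List (String × String)} (d : PySem.Dict String String)
    (hd : d.items ≠ []) : (d.update rp).items ≠ [] := by
  induction rp generalizing d with
  | nil => simpa [PySem.Dict.update]
  | cons p ps ih =>
    have : d.update (p :: ps) = (d.insert p.1 p.2).update ps := by
      simp [PySem.Dict.update]
    rw [this]
    apply ih
    rw [PySem.Dict.items_insert]
    by_cases hc : d.contains p.1 = true <;> simp_all

theorem cnuValues_ne_nil {rp : List (String × String)} (h : rp ≠ []) :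
    (PySem.Dict.ofList rp).values ≠ [] := by
  match rp, h with
  | p :: ps, _ =>
    intro hv
    have h1 : (PySem.Dict.ofList (p :: ps)).items ≠ [] := by
      have : PySem.Dict.ofList (p :: ps) = (PySem.Dict.empty.insert p.1 p.2).update ps := by
        simp [PySem.Dict.ofList, PySem.Dict.update]
      rw [this]
      apply dict_update_items_ne_nil
      simp [PySem.Dict.items_insert]
    have h2 : (PySem.Dict.ofList (p :: ps)).items = [] := by
      simpa [PySem.Dict.values] using hv
    exact h1 h2

-- port A scans rows until the first empty dict and answers whether the hits seen exceed 1
theorem cnuRows_char (column cellStr : String) (headers : List String) (hcell : cellStr ≠ "")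
    (rows : List (List (String × String))) :
    ∀ k : Int, k ≤ 1 →
      cnuRows column cellStr headers rows k =
        decide (1 < k + (((rows.takeWhile (fun rp => !rp.isEmpty)).map
          (fun rp => cnuHits column cellStr headers (cnuVals rp) headers.length)).sum : Int)) := by
  induction rows with
  | nil =>
    intro k hk
    simp only [cnuRows, List.takeWhile_nil, List.map_nil, List.sum_nil]
    symm; rw [decide_eq_false_iff_not]; omega
  | cons rp rest ih =>
    intro k hk
    by_cases hemp : rp.isEmpty
    · have hrp : rp = [] := List.isEmpty_iff.mp hemp
      have hvals : (PySem.Dict.ofList rp).values = [] := by subst hrp; rfl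
      have hpop : PySem.List.pop? (([] : List String)) 0 = none := by decide
      have hfalse : cnuRows column cellStr headers (rp :: rest) k = false := by
        rw [cnuRows, hvals, hpop]
      have htake : (rp :: rest).takeWhile (fun rp => !rp.isEmpty) = [] := by
        simp [hemp]
      rw [hfalse, htake]
      symm; rw [decide_eq_false_iff_not]
      simp only [List.map_nil, List.sum_nil, Nat.cast_zero, add_zero]
      omega
    · have hrp : rp ≠ [] := by simpa [List.isEmpty_iff] using hemp
      obtain ⟨v, vs, hv⟩ : ∃ v vs, (PySem.Dict.ofList rp).values = v :: vs := by
        cases hvals : (PySem.Dict.ofList rp).values with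
        | nil => exact absurd hvals (cnuValues_ne_nil hrp)
        | cons v vs => exact ⟨v, vs, rfl⟩
      have hdrop : cnuVals rp = vs := by unfold cnuVals; rw [hv]; rfl
      rw [cnuRows, hv, PySem.List.pop?_zero_cons]
      show (match cnuInner column cellStr headers vs (PySem.List.pyRange 0 (headers.length : Int) 1) k with
            | none => true
            | some k' => cnuRows column cellStr headers rest k') = _
      rw [cnuInner_eq column cellStr headers vs _ k hk, cnuRowCnt_cast column cellStr headers vs hcell]
      have htake : (rp :: rest).takeWhile (fun rp => !rp.isEmpty)
          = rp :: rest.takeWhile (fun rp => !rp.isEmpty) := by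
        simp [hemp]
      rw [htake, List.map_cons, List.sum_cons, hdrop]
      set m := cnuHits column cellStr headers vs headers.length with hm
      by_cases hbig : k + (m : Int) > 1
      · rw [if_pos hbig]
        show true = _
        symm; rw [decide_eq_true_iff]
        omega
      · rw [if_neg hbig]
        show cnuRows column cellStr headers rest (k + (m : Int)) = _
        rw [ih (k + (m : Int)) (by omega)]
        simp only [Nat.cast_add, add_assoc]

-- B's per-row zip count = cnuHits over the whole header range
theorem cnuZip_cnt (column cellStr : String) (headers : List String) :
    ∀ vals : List String,
      ((headers.zip vals).countP
        (fun p => (((column == "ID" || column == "Label" || column == "Definition") && p.1 == column)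
          && (PySem.Str.strip p.2 == cellStr))))
        = cnuHits column cellStr headers vals headers.length := by
  induction headers with
  | nil => intro vals; simp [cnuHits]
  | cons h hs ih =>
    intro vals
    cases vals with
    | nil =>
      simp only [List.zip_nil_right, List.countP_nil]
      unfold cnuHits
      symm
      rw [List.countP_eq_zero]
      intro c _
      simp [cnuHitN]
    | cons v vs =>
      rw [List.zip_cons_cons, List.countP_cons, ih vs]
      unfold cnuHits
      rw [List.length_cons, List.range_succ_eq_map, List.countP_cons, List.countP_map]
      have hshift : ∀ c : Nat, cnuHitN column cellStr (h :: hs) (v :: vs) (Nat.succ c)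
          = cnuHitN column cellStr hs vs c := by
        intro c
        simp [cnuHitN, cnuMatchN]
      have hcg : List.countP (cnuHitN column cellStr (h :: hs) (v :: vs) ∘ Nat.succ)
            (List.range hs.length)
          = List.countP (cnuHitN column cellStr hs vs) (List.range hs.length) :=
        List.countP_congr (fun c _ => by simpa [Function.comp] using hshift c)
      have hzero : cnuHitN column cellStr (h :: hs) (v :: vs) 0
          = ((((column == "ID" || column == "Label" || column == "Definition") && (h, v).1 == column)
              && (PySem.Str.strip (h, v).2 == cellStr))) := by
        show (((column == "ID" || column == "Label" || column == "Definition")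
            && (((h :: hs).getD 0 "") == column)) && decide (0 < (v :: vs).length)
            && (PySem.Str.strip ((v :: vs).getD 0 "") == cellStr)) = _
        simp [Bool.and_assoc]
      rw [hcg, hzero]

-- port B counts every matching in-range cell of the whole table
theorem alt_char (cell column : String) (headers : List String)
    (table : List (List (String × String))) (hcell : PySem.Str.strip cell ≠ "") :
    checkNotUnique_alt cell column headers table =
      decide (1 < ((table.map
        (fun rp => cnuHits column (PySem.Str.strip cell) headers (cnuVals rp) headers.length)).sum : Int)) := by
  show (if (PySem.Str.strip cell == "") = true then false
    else decide (1 < ((cnuAltOccs column headers table).foldl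
      (fun d v => d.insert v (d.getD v 0 + 1))
      (PySem.Dict.empty : PySem.Dict String Int)).getD (PySem.Str.strip cell) 0)) = _
  rw [if_neg (by simpa using hcell)]
  rw [PySem.Dict.getD_foldl_insert_add_one, PySem.Dict.getD_empty]
  have hcount : (cnuAltOccs column headers table).count (PySem.Str.strip cell)
      = (table.map
        (fun rp => cnuHits column (PySem.Str.strip cell) headers (cnuVals rp) headers.length)).sum := by
    unfold cnuAltOccs
    rw [List.count_eq_countP, List.countP_flatMap]
    apply congrArg List.sum
    apply List.map_congr_left
    intro rp _
    simp only [Function.comp]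
    rw [List.countP_map, List.countP_filter]
    rw [← cnuZip_cnt column (PySem.Str.strip cell) headers (cnuVals rp)]
    unfold cnuVals
    exact List.countP_congr fun p _ => by
      simp only [Function.comp]
      cases hg : (PySem.Str.strip p.2 == PySem.Str.strip cell) <;> simp [Bool.and_comm]
  rw [hcount]
  simp

-- cnuHits is monotone in its range bound
theorem cnuHits_mono (column cellStr : String) (headers vals : List String) {b n : Nat}
    (h : b ≤ n) : cnuHits column cellStr headers vals b ≤ cnuHits column cellStr headers vals n := by
  unfold cnuHits
  obtain ⟨m, rfl⟩ := Nat.exists_eq_add_of_le h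
  rw [List.range_add, List.countP_append]
  omega

-- the hits before the first bad access are among those port A scans before the first empty row
theorem cnuPreHits_le (column cellStr : String) (headers : List String) :
    ∀ rows : List (List (String × String)),
      cnuPreHits column cellStr headers rows ≤
        ((rows.takeWhile (fun rp => !rp.isEmpty)).map
          (fun rp => cnuHits column cellStr headers (cnuVals rp) headers.length)).sum := by
  intro rows
  induction rows with
  | nil => simp [cnuPreHits]
  | cons rp rest ih =>
    by_cases hgood : cnuRowGood column headers rp = true
    · have hemp : (!rp.isEmpty) = true := by
        unfold cnuRowGood at hgood
        exact (Bool.and_elim_left hgood)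
      rw [cnuPreHits]
      rw [if_pos hgood]
      have : (rp :: rest).takeWhile (fun rp => !rp.isEmpty)
          = rp :: rest.takeWhile (fun rp => !rp.isEmpty) := by
        simp [hemp]
      rw [this, List.map_cons, List.sum_cons]
      omega
    · rw [cnuPreHits, if_neg hgood]
      by_cases hemp : rp.isEmpty
      · rw [if_pos hemp]; omega
      · rw [if_neg hemp]
        have htake : (rp :: rest).takeWhile (fun rp => !rp.isEmpty)
            = rp :: rest.takeWhile (fun rp => !rp.isEmpty) := by
          simp [hemp]
        rw [htake, List.map_cons, List.sum_cons]
        cases hbad : cnuRowBad column headers (cnuVals rp) with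
        | none =>
          exfalso
          apply hgood
          unfold cnuRowGood
          simp [hemp, hbad]
        | some b =>
          show cnuHits column cellStr headers (cnuVals rp) b ≤ _
          have hble : b < headers.length := by
            have hmem : b ∈ List.range headers.length := List.mem_of_find?_eq_some hbad
            simpa using hmem
          have := cnuHits_mono column cellStr headers (cnuVals rp) (Nat.le_of_lt hble)
          omega

-- sum over the non-empty-row prefix ≤ sum over the whole table
theorem takeWhile_sum_le (column cellStr : String) (headers : List String)
    (table : List (List (String × String))) :
    ((table.takeWhile (fun rp => !rp.isEmpty)).map
        (fun rp => cnuHits column cellStr headers (cnuVals rp) headers.length)).sum ≤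
      (table.map (fun rp => cnuHits column cellStr headers (cnuVals rp) headers.length)).sum := by
  conv_rhs => rw [← List.takeWhile_append_dropWhile (p := fun rp => !rp.isEmpty) (l := table)]
  rw [List.map_append, List.sum_append]
  omega

-- ===== VERDICT (by name: the statement is the Claim_ definition above) =====
theorem checkNotUnique_spec : Claim_equal_checkNotUnique := by
  unfold Claim_equal_checkNotUnique
  intro cell column headers table _ hpre
  unfold Spec_checkNotUnique
  by_cases hblank : PySem.Str.strip cell = ""
  · unfold checkNotUnique checkNotUnique_alt
    simp [hblank]
  · have hA := cnuRows_char column (PySem.Str.strip cell) headers hblank table 0 (by norm_num)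
    have hB := alt_char cell column headers table hblank
    unfold checkNotUnique
    rw [if_neg (by simpa using hblank), hA, hB]
    rcases hpre with h | h | h
    · exact absurd h hblank
    · -- every row is good, hence non-empty: the takeWhile prefix is the whole table
      have : table.takeWhile (fun rp => !rp.isEmpty) = table := by
        rw [List.takeWhile_eq_self_iff]
        intro rp hrp
        unfold cnuRowGood at h
        exact (Bool.and_elim_left (h rp hrp))
      rw [this]
      norm_num
    · -- at least two hits before the first bad access: both counts exceed 1
      have h1 := cnuPreHits_le column (PySem.Str.strip cell) headers table
      have h2 := takeWhile_sum_le column (PySem.Str.strip cell) headers table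
      have hA2 : 1 < (0 : Int) + (((table.takeWhile (fun rp => !rp.isEmpty)).map
          (fun rp => cnuHits column (PySem.Str.strip cell) headers (cnuVals rp) headers.length)).sum : Int) := by
        omega
      have hB2 : 1 < ((table.map
          (fun rp => cnuHits column (PySem.Str.strip cell) headers (cnuVals rp) headers.length)).sum : Int) := by
        omega
      rw [decide_eq_true hA2, decide_eq_true hB2]
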